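-- pv_equiv track=rewrite | github.com/Shrinjita/python-algorithms-and-solutions | max_profit_spells.py | max_profit_after_spells
-- ===== SOURCE A (Python) =====
-- def max_profit_after_spells(n, profits):
--     # Step 1: Calculate total sum without any spells
--     total_sum = sum(profits)
--
--     # Step 2: Use Kadane's algorithm to find the best subarray for blue magic
--     max_blue_sum = -float('inf')
--     current_sum = 0
--     for profit in profits:
--         current_sum += profit
--         max_blue_sum = max(max_blue_sum, current_sum)
--         if current_sum < 0:
--             current_sum = 0
--
--     # Step 3: Find the maximum profit to negate with green magic
--     max_single_profit = max(profits)
--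
--     # Step 4: Maximize total profit
--     max_total_profit = total_sum + max_blue_sum - 2 * max_single_profit
--     return max_total_profit
-- ===== SOURCE B (Python) =====
-- def max_profit_after_spells(n, profits):
--     # Stage 1: prefix sums P[0..n] with P[0] = 0.
--     prefixes = [0]
--     s = 0
--     for p in profits:
--         s += p
--         prefixes.append(s)
--     # Stage 2: mins[j] = min(P[0..j]) for j = 0..n-1 (running minimum of prefixes).
--     mins = [0]
--     m = 0
--     for q in prefixes[1:-1]:
--         if q < m:
--             m = q
--         mins.append(m)
--     # Stage 3: best nonempty-subarray sum = max over end positions of P[end] - min earlier prefix.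
--     best = max(pj - mj for pj, mj in zip(prefixes[1:], mins))
--     return s + best - 2 * max(profits)
-- ===== Notes on version B (the rewrite author's own statement) =====
-- stated objective: alternative
-- what changed: Replaces A's single Kadane reset-to-zero loop by three staged passes: build the prefix-sum list, build the running-minimum list of prefixes, then take the max of their zipped differences.
import Mathlib
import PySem

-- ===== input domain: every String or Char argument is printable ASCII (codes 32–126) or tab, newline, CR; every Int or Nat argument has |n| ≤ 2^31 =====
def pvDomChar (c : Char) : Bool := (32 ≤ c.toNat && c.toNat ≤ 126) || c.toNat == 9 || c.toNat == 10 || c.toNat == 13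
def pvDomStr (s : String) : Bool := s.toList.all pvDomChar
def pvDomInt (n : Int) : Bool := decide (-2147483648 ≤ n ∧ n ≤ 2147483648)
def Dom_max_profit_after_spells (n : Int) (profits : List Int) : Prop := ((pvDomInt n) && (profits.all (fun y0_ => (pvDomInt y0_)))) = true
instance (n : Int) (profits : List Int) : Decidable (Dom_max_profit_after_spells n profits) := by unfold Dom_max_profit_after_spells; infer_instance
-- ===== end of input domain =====

-- B replaces A's single Kadane reset-loop by three staged passes (prefix-sum list, running-minimum list, max over their zipped differences); alternative decomposition, same cost.

-- ===== PORT A =====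
-- Kadane state: (max_blue_sum as Option Int, none = -float('inf'); current_sum)
-- max(-inf-or-m, c): Python's max with the -inf sentinel
def pvMaxO (o : Option Int) (c : Int) : Int :=
  match o with
  | none => c
  | some m => max m c

def pvKStep (st : Option Int × Int) (p : Int) : Option Int × Int :=
  let c := st.2 + p
  (some (pvMaxO st.1 c), if c < 0 then 0 else c)

def max_profit_after_spells (n : Int) (profits : List Int) : Int :=
  let total_sum := profits.foldl (· + ·) 0
  let st := profits.foldl pvKStep (none, 0)
  match PySem.List.max? profits (fun x => x), st.1 with
  | some m, some b => total_sum + b - 2 * m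
  | _, _ => 0  -- unreachable under Pre_ (Python raises ValueError on empty profits)

-- ===== PORT B =====
-- Stage 1 loop body: append the next prefix sum, track the running sum s
def pvPrefStep (st : List Int × Int) (p : Int) : List Int × Int :=
  let s := st.2 + p
  (st.1 ++ [s], s)

-- Stage 2 loop body: append the running minimum m of the prefixes seen so far
def pvMinStep (st : List Int × Int) (q : Int) : List Int × Int :=
  let m := if q < st.2 then q else st.2
  (st.1 ++ [m], m)

def max_profit_after_spells_alt (n : Int) (profits : List Int) : Int :=
  let ps := profits.foldl pvPrefStep ([0], 0)
  let prefixes := ps.1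
  let s := ps.2
  let mins := ((PySem.List.slice prefixes (some 1) (some (-1))).foldl pvMinStep ([0], 0)).1
  let cands := (List.zip (PySem.List.slice prefixes (some 1) none) mins).map (fun pm => pm.1 - pm.2)
  match PySem.List.max? cands (fun x => x) with
  | none => 0  -- unreachable under Pre_ (empty list)
  | some best =>
    match PySem.List.max? profits (fun x => x) with
    | none => 0
    | some mx => s + best - 2 * mx

-- ===== PRECONDITION & SPEC =====
-- Pre_ excludes the empty list, on which Python A raises ValueError at max(profits).
def Pre_max_profit_after_spells (n : Int) (profits : List Int) : Prop := profits ≠ []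
instance (n : Int) (profits : List Int) : Decidable (Pre_max_profit_after_spells n profits) := by unfold Pre_max_profit_after_spells; infer_instance
def pvWitness_max_profit_after_spells : Int × List Int := (0, [1, -2, 3])

def Spec_max_profit_after_spells (n : Int) (profits : List Int) (out : Int) : Prop := out = max_profit_after_spells_alt n profits
instance (n : Int) (profits : List Int) (out : Int) : Decidable (Spec_max_profit_after_spells n profits out) := by unfold Spec_max_profit_after_spells; infer_instance

-- ===== CLAIM (what is proved, stated in full; the proofs are below) =====
def Claim_equal_max_profit_after_spells : Prop := ∀ (n : Int) (profits : List Int), Dom_max_profit_after_spells n profits → Pre_max_profit_after_spells n profits → Spec_max_profit_after_spells n profits (max_profit_after_spells n profits)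

-- ===== LEMMAS AND PROOFS =====

-- Proof-side recursions mirroring B's three stages on a cons list.
-- pfxL s l = the prefix sums of l continued from running sum s
def pfxL (s : Int) : List Int → List Int
  | [] => []
  | p :: t => (s + p) :: pfxL (s + p) t

-- minL m l = the running minima of l continued from minimum m
def minL (m : Int) : List Int → List Int
  | [] => []
  | q :: t => (if q < m then q else m) :: minL (if q < m then q else m) t

-- candL s m l = the candidate subarray sums P[end] - min-earlier-prefix
def candL (s m : Int) : List Int → List Int
  | [] => []
  | p :: t => (s + p - m) :: candL (s + p) (if s + p < m then s + p else m) t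

theorem pfxL_cons (s p : Int) (t : List Int) : pfxL s (p :: t) = (s + p) :: pfxL (s + p) t := rfl

theorem pfxL_ne_nil (s p : Int) (t : List Int) : pfxL s (p :: t) ≠ [] := by
  simp [pfxL_cons]

-- Stage 1 fold builds acc ++ pfxL and the running sum
theorem pref_fold (l : List Int) (acc : List Int) (s : Int) :
    l.foldl pvPrefStep (acc, s) = (acc ++ pfxL s l, l.foldl (· + ·) s) := by
  induction l generalizing acc s with
  | nil => simp [pfxL]
  | cons p t ih => simp [pvPrefStep, ih, pfxL]

-- Stage 2 fold builds acc ++ minL (first component)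
theorem min_fold (l : List Int) (acc : List Int) (m : Int) :
    (l.foldl pvMinStep (acc, m)).1 = acc ++ minL m l := by
  induction l generalizing acc m with
  | nil => simp [minL]
  | cons q t ih => simp [pvMinStep, ih, minL]

-- Python's prefixes[1:-1] on the concrete shape 0 :: L
theorem slice_one_neg_one (L : List Int) :
    PySem.List.slice (0 :: L) (some 1) (some (-1)) = L.dropLast := by
  simp [PySem.List.slice, PySem.List.clampIdx, List.dropLast_eq_take]
  split <;> omega

-- Stage 3: zipping the prefix sums with the shifted running minima yields candL
theorem zip_cand (l : List Int) (s m : Int) :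
    (List.zip (pfxL s l) (m :: minL m (pfxL s l).dropLast)).map (fun pm => pm.1 - pm.2)
      = candL s m l := by
  induction l generalizing s m with
  | nil => simp [pfxL, candL]
  | cons p t ih =>
    cases t with
    | nil => simp [pfxL, minL, candL]
    | cons p' t' =>
      rw [pfxL_cons, List.dropLast_cons_of_ne_nil (pfxL_ne_nil _ _ _)]
      show ((s + p, m) :: _).map _ = _
      rw [candL]
      simp only [List.map_cons]
      congr 1
      have := ih (s + p) (if s + p < m then s + p else m)
      simp only [minL] at *
      exact this

-- folding Python max over a list, starting from the -inf sentinel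
theorem maxfold_some (t : List Int) (b : Int) :
    t.foldl (fun o c => some (pvMaxO o c)) (some b) = some (t.foldl max b) := by
  induction t generalizing b with
  | nil => rfl
  | cons c t ih => simpa [pvMaxO] using ih (max b c)

-- A's Kadane fold, started with current_sum = s - m (m = min prefix so far),
-- records exactly the running maximum of candL s m l.
theorem kadane_cand (l : List Int) (b : Option Int) (s m : Int) (h : m ≤ s) :
    (l.foldl pvKStep (b, s - m)).1
      = (candL s m l).foldl (fun o c => some (pvMaxO o c)) b := by
  induction l generalizing b s m with
  | nil => rfl
  | cons p t ih =>
    simp only [List.foldl_cons, pvKStep, candL]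
    by_cases hlt : s + p < m
    · have h1 : s - m + p < 0 := by omega
      simp only [if_pos h1, if_pos hlt]
      have := ih (some (pvMaxO b (s - m + p))) (s + p) (s + p) (le_refl _)
      have e : s - m + p = s + p - m := by ring
      simpa [e, sub_self] using this
    · have h1 : ¬ (s - m + p < 0) := by omega
      simp only [if_neg h1, if_neg hlt]
      have := ih (some (pvMaxO b (s - m + p))) (s + p) m (by omega)
      have e : s - m + p = s + p - m := by ring
      simpa [e] using this

-- ===== VERDICT (by name: the statement is the Claim_ definition above) =====
theorem max_profit_after_spells_spec : Claim_equal_max_profit_after_spells := by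
  intro n profits _ hpre
  unfold Spec_max_profit_after_spells max_profit_after_spells max_profit_after_spells_alt
  cases profits with
  | nil => exact absurd rfl hpre
  | cons p t =>
    -- B's stages, rewritten to the recursions
    rw [pref_fold]
    simp only [List.singleton_append, PySem.List.slice_from_one, List.tail_cons,
      slice_one_neg_one, min_fold, List.singleton_append, zip_cand]
    -- A's Kadane fold equals the running max of the same candidate list
    have hk := kadane_cand (p :: t) none 0 0 (le_refl 0)
    simp only [sub_self] at hk
    rw [hk]
    -- both maxima are the same fold
    rw [candL]
    simp only [PySem.List.max?_id_cons, List.foldl_cons]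
    rw [maxfold_some]
    rfl
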